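-- pv_equiv track=rewrite | github.com/LeoYANQING/COMP7404- | a2/p2.py | generate_layout_string
-- ===== SOURCE A (Python) =====
-- def generate_layout_string(pacman_pos, ghost_pos, foods, original_layout):
--     layout = []
--     for i in range(len(original_layout)):
--         row = []
--         for j in range(len(original_layout[i])):
--             if (i, j) == pacman_pos:
--                 row.append('P')
--             elif (i, j) == ghost_pos:
--                 row.append('W')
--             else:
--                 if original_layout[i][j] == '%':
--                     row.append('%')
--                 elif (i, j) in foods:
--                     row.append('.')
--                 else:
--                     row.append(' ')
--         layout.append(''.join(row))
--     return '\n'.join(layout)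
-- ===== SOURCE B (Python) =====
-- def generate_layout_string(pacman_pos, ghost_pos, foods, original_layout):
--     # Build base grid (walls kept, everything else blank), then overlay the
--     # sparse features instead of testing every cell against every feature.
--     grid = [['%' if ch == '%' else ' ' for ch in row] for row in original_layout]
--     for (i, j) in set(foods):
--         if 0 <= i < len(grid) and 0 <= j < len(grid[i]) and grid[i][j] != '%':
--             grid[i][j] = '.'
--     for (i, j), ch in ((ghost_pos, 'W'), (pacman_pos, 'P')):
--         if 0 <= i < len(grid) and 0 <= j < len(grid[i]):
--             grid[i][j] = ch
--     return '\n'.join(''.join(row) for row in grid)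
-- ===== Notes on version B (the rewrite author's own statement) =====
-- stated objective: faster
-- what changed: Instead of deciding each cell with per-cell membership tests against the foods list, B builds a base wall/blank grid once and overlays the sparse foods (as a set) and the ghost/pacman positions with bounds-checked point updates, then joins.
import Mathlib
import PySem

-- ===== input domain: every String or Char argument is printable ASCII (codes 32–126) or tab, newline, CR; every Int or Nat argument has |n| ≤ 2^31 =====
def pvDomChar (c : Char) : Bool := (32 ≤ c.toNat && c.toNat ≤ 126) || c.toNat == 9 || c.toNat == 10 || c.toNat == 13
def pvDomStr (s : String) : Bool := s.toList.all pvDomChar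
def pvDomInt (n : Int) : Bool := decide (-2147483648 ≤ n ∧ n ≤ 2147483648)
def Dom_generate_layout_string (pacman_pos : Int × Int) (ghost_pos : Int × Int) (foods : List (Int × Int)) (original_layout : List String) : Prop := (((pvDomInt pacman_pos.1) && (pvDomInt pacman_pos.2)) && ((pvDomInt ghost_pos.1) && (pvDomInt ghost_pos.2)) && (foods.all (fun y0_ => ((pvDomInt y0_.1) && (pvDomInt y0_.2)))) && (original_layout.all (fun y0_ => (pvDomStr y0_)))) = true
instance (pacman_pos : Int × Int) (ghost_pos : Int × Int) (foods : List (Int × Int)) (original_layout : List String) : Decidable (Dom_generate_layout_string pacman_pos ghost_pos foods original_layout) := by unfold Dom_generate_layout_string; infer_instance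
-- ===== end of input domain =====

-- B builds the base wall/blank grid once and overlays the sparse foods / ghost / pacman
-- with bounds-checked point updates, instead of A's per-cell membership tests.

-- ===== PORT A =====
def generate_layout_string (pacman_pos : Int × Int) (ghost_pos : Int × Int) (foods : List (Int × Int)) (original_layout : List String) : String :=
  let layout := (List.range original_layout.length).map (fun (i : Nat) =>
    let row := (original_layout.getD i "").toList
    String.mk ((List.range row.length).map (fun (j : Nat) =>
      if ((i : Int), (j : Int)) = pacman_pos then 'P'
      else if ((i : Int), (j : Int)) = ghost_pos then 'W'
      else if row.getD j ' ' = '%' then '%'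
      else if ((i : Int), (j : Int)) ∈ foods then '.'
      else ' ')))
  String.intercalate "\n" layout

-- ===== PORT B =====
def pvBase (orig : List String) : List (List Char) :=
  orig.map (fun r => r.toList.map (fun ch => if ch = '%' then '%' else ' '))

-- grid[i][j] = '.' when in bounds and not a wall (the food overlay)
def pvPlaceFood (g : List (List Char)) (p : Int × Int) : List (List Char) :=
  if 0 ≤ p.1 ∧ p.1 < (g.length : Int) ∧ 0 ≤ p.2 ∧ p.2 < ((g.getD p.1.toNat []).length : Int)
      ∧ (g.getD p.1.toNat []).getD p.2.toNat ' ' ≠ '%' then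
    g.set p.1.toNat ((g.getD p.1.toNat []).set p.2.toNat '.')
  else g

-- grid[i][j] = c when in bounds (the ghost/pacman overlay)
def pvPlace (g : List (List Char)) (p : Int × Int) (c : Char) : List (List Char) :=
  if 0 ≤ p.1 ∧ p.1 < (g.length : Int) ∧ 0 ≤ p.2 ∧ p.2 < ((g.getD p.1.toNat []).length : Int) then
    g.set p.1.toNat ((g.getD p.1.toNat []).set p.2.toNat c)
  else g

def generate_layout_string_alt (pacman_pos : Int × Int) (ghost_pos : Int × Int) (foods : List (Int × Int)) (original_layout : List String) : String :=
  let g0 := pvBase original_layout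
  -- set(foods): iteration order is immaterial here (independent, idempotent point updates)
  let g1 := (PySem.Set.ofList foods).foldl pvPlaceFood g0
  let g2 := pvPlace g1 ghost_pos 'W'
  let g3 := pvPlace g2 pacman_pos 'P'
  String.intercalate "\n" (g3.map String.mk)

-- ===== PRECONDITION & SPEC =====
def Spec_generate_layout_string (pacman_pos : Int × Int) (ghost_pos : Int × Int) (foods : List (Int × Int)) (original_layout : List String) (out : String) : Prop := out = generate_layout_string_alt pacman_pos ghost_pos foods original_layout
instance (pacman_pos : Int × Int) (ghost_pos : Int × Int) (foods : List (Int × Int)) (original_layout : List String) (out : String) : Decidable (Spec_generate_layout_string pacman_pos ghost_pos foods original_layout out) := by unfold Spec_generate_layout_string; infer_instance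

-- ===== CLAIM (what is proved, stated in full; the proofs are below) =====
def Claim_equal_generate_layout_string : Prop := ∀ (pacman_pos : Int × Int) (ghost_pos : Int × Int) (foods : List (Int × Int)) (original_layout : List String), Dom_generate_layout_string pacman_pos ghost_pos foods original_layout → Spec_generate_layout_string pacman_pos ghost_pos foods original_layout (generate_layout_string pacman_pos ghost_pos foods original_layout)

-- ===== LEMMAS AND PROOFS =====

-- cell accessor used throughout the proofs
def pvCell (g : List (List Char)) (i j : Nat) : Char := (g.getD i []).getD j ' '

theorem pv_getD_set {α : Type} (l : List α) (k i : Nat) (a d : α) :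
    (l.set k a).getD i d = if i = k ∧ k < l.length then a else l.getD i d := by
  rcases lt_or_ge i l.length with h | h
  · by_cases hk : i = k
    · subst hk
      simp [List.getD, h]
    · simp [List.getD, Ne.symm hk, hk]
  · have h' : (l.set k a).length ≤ i := by simpa using h
    rw [List.getD_eq_default _ _ h', List.getD_eq_default _ _ h]
    have : ¬ (i = k ∧ k < l.length) := by omega
    simp [this]

theorem pvCell_set_self (g : List (List Char)) (i j : Nat) (c : Char)
    (hi : i < g.length) (hj : j < (g.getD i []).length) :
    pvCell (g.set i ((g.getD i []).set j c)) i j = c := by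
  unfold pvCell
  rw [pv_getD_set, if_pos ⟨rfl, hi⟩, pv_getD_set, if_pos ⟨rfl, hj⟩]

theorem pvCell_set_other (g : List (List Char)) (k l i j : Nat) (c : Char)
    (h : i ≠ k ∨ j ≠ l) :
    pvCell (g.set k ((g.getD k []).set l c)) i j = pvCell g i j := by
  unfold pvCell
  rw [pv_getD_set]
  split_ifs with h1
  · obtain ⟨rfl, -⟩ := h1
    rw [pv_getD_set]
    split_ifs with h2
    · obtain ⟨rfl, -⟩ := h2
      exact absurd h (by simp)
    · rfl
  · rfl

theorem pvPlace_length (g : List (List Char)) (p : Int × Int) (c : Char) :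
    (pvPlace g p c).length = g.length := by
  unfold pvPlace; split_ifs <;> simp

theorem pvPlaceFood_length (g : List (List Char)) (p : Int × Int) :
    (pvPlaceFood g p).length = g.length := by
  unfold pvPlaceFood; split_ifs <;> simp

theorem pvPlace_rowlen (g : List (List Char)) (p : Int × Int) (c : Char) (i : Nat) :
    ((pvPlace g p c).getD i []).length = (g.getD i []).length := by
  unfold pvPlace
  split_ifs with h
  · rw [pv_getD_set]
    split_ifs with h3
    · obtain ⟨rfl, -⟩ := h3; simp
    · rfl
  · rfl

theorem pvPlaceFood_rowlen (g : List (List Char)) (p : Int × Int) (i : Nat) :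
    ((pvPlaceFood g p).getD i []).length = (g.getD i []).length := by
  unfold pvPlaceFood
  split_ifs with h
  · rw [pv_getD_set]
    split_ifs with h3
    · obtain ⟨rfl, -⟩ := h3; simp
    · rfl
  · rfl

theorem pvFold_length (s : List (Int × Int)) (g : List (List Char)) :
    (s.foldl pvPlaceFood g).length = g.length := by
  induction s generalizing g with
  | nil => rfl
  | cons p s ih => rw [List.foldl_cons, ih, pvPlaceFood_length]

theorem pvFold_rowlen (s : List (Int × Int)) (g : List (List Char)) (i : Nat) :
    ((s.foldl pvPlaceFood g).getD i []).length = (g.getD i []).length := by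
  induction s generalizing g with
  | nil => rfl
  | cons p s ih => rw [List.foldl_cons, ih, pvPlaceFood_rowlen]

-- cell after a bounds-checked unconditional point update
theorem pvCell_place (g : List (List Char)) (p : Int × Int) (c : Char) (i j : Nat)
    (hi : i < g.length) (hj : j < (g.getD i []).length) :
    pvCell (pvPlace g p c) i j =
      if p = ((i : Int), (j : Int)) then c else pvCell g i j := by
  unfold pvPlace
  by_cases hp : p = ((i : Int), (j : Int))
  · have h1 : p.1 = (i : Int) := by rw [hp]
    have h2 : p.2 = (j : Int) := by rw [hp]
    have hk : p.1.toNat = i := by rw [h1]; simp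
    have hl : p.2.toNat = j := by rw [h2]; simp
    have hcond : 0 ≤ p.1 ∧ p.1 < (g.length : Int) ∧ 0 ≤ p.2 ∧ p.2 < ((g.getD p.1.toNat []).length : Int) := by
      refine ⟨by rw [h1]; positivity, by rw [h1]; exact_mod_cast hi, by rw [h2]; positivity, ?_⟩
      rw [h2, hk]; exact_mod_cast hj
    rw [if_pos hcond, hk, hl, if_pos hp]
    exact pvCell_set_self g i j c hi hj
  · rw [if_neg hp]
    split_ifs with h
    · apply pvCell_set_other
      by_contra hc
      push_neg at hc
      apply hp
      obtain ⟨e1, e2⟩ := hc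
      refine Prod.ext_iff.mpr ⟨?_, ?_⟩ <;> omega
    · rfl

-- cell after a bounds- and wall-checked food update
theorem pvCell_placeFood (g : List (List Char)) (p : Int × Int) (i j : Nat)
    (hi : i < g.length) (hj : j < (g.getD i []).length) :
    pvCell (pvPlaceFood g p) i j =
      if p = ((i : Int), (j : Int)) ∧ pvCell g i j ≠ '%' then '.' else pvCell g i j := by
  unfold pvPlaceFood
  by_cases hp : p = ((i : Int), (j : Int))
  · have h1 : p.1 = (i : Int) := by rw [hp]
    have h2 : p.2 = (j : Int) := by rw [hp]
    have hk : p.1.toNat = i := by rw [h1]; simp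
    have hl : p.2.toNat = j := by rw [h2]; simp
    by_cases hw : pvCell g i j = '%'
    · have hcond : ¬ (0 ≤ p.1 ∧ p.1 < (g.length : Int) ∧ 0 ≤ p.2 ∧ p.2 < ((g.getD p.1.toNat []).length : Int)
          ∧ (g.getD p.1.toNat []).getD p.2.toNat ' ' ≠ '%') := by
        intro hc
        exact hc.2.2.2.2 (by rw [hk, hl]; exact hw)
      rw [if_neg hcond, if_neg (fun hc => hc.2 hw)]
    · have hcond : 0 ≤ p.1 ∧ p.1 < (g.length : Int) ∧ 0 ≤ p.2 ∧ p.2 < ((g.getD p.1.toNat []).length : Int)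
          ∧ (g.getD p.1.toNat []).getD p.2.toNat ' ' ≠ '%' := by
        refine ⟨by rw [h1]; positivity, by rw [h1]; exact_mod_cast hi, by rw [h2]; positivity, ?_, ?_⟩
        · rw [h2, hk]; exact_mod_cast hj
        · rw [hk, hl]; exact hw
      rw [if_pos hcond, hk, hl, if_pos ⟨hp, hw⟩]
      exact pvCell_set_self g i j '.' hi hj
  · rw [if_neg (fun hc : _ ∧ _ => hp hc.1)]
    split_ifs with h
    · apply pvCell_set_other
      by_contra hc
      push_neg at hc
      apply hp
      obtain ⟨e1, e2⟩ := hc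
      refine Prod.ext_iff.mpr ⟨?_, ?_⟩ <;> omega
    · rfl

-- cell after folding all food updates: '.' exactly where a food hits a non-wall cell
theorem pvCell_fold (s : List (Int × Int)) (g : List (List Char)) (i j : Nat)
    (hi : i < g.length) (hj : j < (g.getD i []).length) :
    pvCell (s.foldl pvPlaceFood g) i j =
      if ((i : Int), (j : Int)) ∈ s ∧ pvCell g i j ≠ '%' then '.' else pvCell g i j := by
  induction s generalizing g with
  | nil => simp
  | cons p s ih =>
    rw [List.foldl_cons,
        ih _ (by rw [pvPlaceFood_length]; exact hi) (by rw [pvPlaceFood_rowlen]; exact hj),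
        pvCell_placeFood g p i j hi hj]
    by_cases hw : pvCell g i j = '%'
    · simp [hw]
    · by_cases hp : p = ((i : Int), (j : Int))
      · have hx : (if p = ((i : Int), (j : Int)) ∧ pvCell g i j ≠ '%' then '.' else pvCell g i j) = '.' :=
          if_pos ⟨hp, hw⟩
        rw [hx]
        have hmem : ((i : Int), (j : Int)) ∈ p :: s ∧ pvCell g i j ≠ '%' :=
          ⟨by rw [hp]; exact List.mem_cons_self, hw⟩
        rw [if_pos hmem]
        split_ifs <;> rfl
      · have hx : (if p = ((i : Int), (j : Int)) ∧ pvCell g i j ≠ '%' then '.' else pvCell g i j) = pvCell g i j :=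
          if_neg (fun hc => hp hc.1)
        rw [hx]
        have hne : ¬ ((i : Int), (j : Int)) = p := fun h => hp h.symm
        simp only [List.mem_cons, hne, false_or]

theorem pvBase_length (orig : List String) : (pvBase orig).length = orig.length := by
  simp [pvBase]

theorem pvBase_row (orig : List String) (i : Nat) (hi : i < orig.length) :
    (pvBase orig).getD i [] = (orig.getD i "").toList.map (fun ch => if ch = '%' then '%' else ' ') := by
  unfold pvBase
  rw [List.getD_eq_getElem _ _ (by simpa using hi), List.getElem_map,
      List.getD_eq_getElem _ _ hi]

theorem pvBase_rowlen (orig : List String) (i : Nat) (hi : i < orig.length) :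
    ((pvBase orig).getD i []).length = (orig.getD i "").toList.length := by
  rw [pvBase_row orig i hi]; simp

theorem pvBase_cell (orig : List String) (i j : Nat) (hi : i < orig.length)
    (hj : j < (orig.getD i "").toList.length) :
    pvCell (pvBase orig) i j =
      if (orig.getD i "").toList.getD j ' ' = '%' then '%' else ' ' := by
  unfold pvCell
  rw [pvBase_row orig i hi,
      List.getD_eq_getElem _ _ (by simpa using hj), List.getElem_map,
      List.getD_eq_getElem _ _ hj]

theorem generate_layout_string_spec : Claim_equal_generate_layout_string := by
  unfold Claim_equal_generate_layout_string
  intro pac ghost foods orig _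
  unfold Spec_generate_layout_string generate_layout_string generate_layout_string_alt
  set g0 := pvBase orig with hg0
  set g1 := (PySem.Set.ofList foods).foldl pvPlaceFood g0 with hg1
  set g2 := pvPlace g1 ghost 'W' with hg2
  set g3 := pvPlace g2 pac 'P' with hg3
  have l1 : g1.length = orig.length := by
    rw [hg1, pvFold_length, hg0, pvBase_length]
  have l2 : g2.length = orig.length := by rw [hg2, pvPlace_length, l1]
  have l3 : g3.length = orig.length := by rw [hg3, pvPlace_length, l2]
  have hlist : (List.range orig.length).map (fun (i : Nat) =>
      String.mk ((List.range (orig.getD i "").toList.length).map (fun (j : Nat) =>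
        if ((i : Int), (j : Int)) = pac then 'P'
        else if ((i : Int), (j : Int)) = ghost then 'W'
        else if (orig.getD i "").toList.getD j ' ' = '%' then '%'
        else if ((i : Int), (j : Int)) ∈ foods then '.'
        else ' '))) = g3.map String.mk := by
    apply List.ext_getElem
    · simp [l3]
    intro i h1 h2
    have hi : i < orig.length := by simpa using h1
    have hi1 : i < g1.length := by rw [l1]; exact hi
    have hi2 : i < g2.length := by rw [l2]; exact hi
    have hrl : (g3.getD i []).length = (orig.getD i "").toList.length := by
      rw [hg3, pvPlace_rowlen, hg2, pvPlace_rowlen, hg1, pvFold_rowlen, hg0,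
          pvBase_rowlen orig i hi]
    simp only [List.getElem_map, List.getElem_range]
    apply congrArg String.mk
    apply List.ext_getElem
    · have hg3i : i < g3.length := by rw [l3]; exact hi
      have hrl' : (g3[i]'hg3i).length = (orig.getD i "").toList.length := by
        rw [← List.getD_eq_getElem g3 ([] : List Char) hg3i]; exact hrl
      simp only [List.length_map, List.length_range]
      exact hrl'.symm
    intro j hj1 hj2
    have hg3i : i < g3.length := by rw [l3]; exact hi
    have hj : j < (orig.getD i "").toList.length := by
      simpa [List.getD_eq_getElem _ "" hi] using hj1
    have hj3 : j < (g3.getD i []).length := by rw [hrl]; exact hj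
    have hj2' : j < (g2.getD i []).length := by
      have t := hj3; rw [hg3, pvPlace_rowlen] at t; exact t
    have hj1' : j < (g1.getD i []).length := by
      have t := hj2'; rw [hg2, pvPlace_rowlen] at t; exact t
    have hj0 : j < (g0.getD i []).length := by
      have t := hj1'; rw [hg1, pvFold_rowlen] at t; exact t
    have hig0 : i < g0.length := by rw [hg0, pvBase_length]; exact hi
    have hcell : (g3[i]'hg3i)[j]'(by simpa using hj2) = pvCell g3 i j := by
      unfold pvCell
      have e1 : g3.getD i [] = g3[i]'hg3i := List.getD_eq_getElem g3 ([] : List Char) hg3i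
      rw [← List.getD_eq_getElem (g3[i]'hg3i) ' ' (by simpa using hj2), e1]
    simp only [List.getElem_map, List.getElem_range]
    rw [hcell,
        hg3, pvCell_place g2 pac 'P' i j hi2 hj2',
        hg2, pvCell_place g1 ghost 'W' i j hi1 hj1',
        hg1, pvCell_fold _ g0 i j hig0 hj0,
        hg0, pvBase_cell orig i j hi hj]
    by_cases hpac : pac = ((i : Int), (j : Int))
    · rw [if_pos hpac, if_pos hpac.symm]
    · rw [if_neg hpac, if_neg (fun h => hpac h.symm)]
      by_cases hgh : ghost = ((i : Int), (j : Int))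
      · rw [if_pos hgh, if_pos hgh.symm]
      · rw [if_neg hgh, if_neg (fun h => hgh h.symm)]
        generalize (orig.getD i "").toList.getD j ' ' = X
        by_cases hw : X = '%' <;> by_cases hm : ((i : Int), (j : Int)) ∈ foods <;>
          simp [hw, hm, PySem.Set.mem_ofList foods]
  exact congrArg (String.intercalate "\n") hlist
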